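-- pv_equiv track=rewrite | github.com/XiaoTaoWang/Project-Euler | gallery/Combinations-and-permutations/Problem-90.py | validpair
-- ===== SOURCE A (Python) =====
-- def validpair(seq1, seq2):
--     ref = {(0,1):0, (0,4):0, (0,9):0, (1,6):0, (2,5):0,
--            (3,6):0, (4,9):0, (6,4):0, (8,1):0}
--     if 6 in seq1:
--         seq1 += (9,)
--     if 9 in seq1:
--         seq1 += (6,)
--     if 6 in seq2:
--         seq2 += (9,)
--     if 9 in seq2:
--         seq2 += (6,)
--
--     for s1 in seq1:
--         for s2 in seq2:
--             r1 = ref.get((s1,s2))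
--             if r1==0:
--                 ref[(s1,s2)] = 1
--             r2 = ref.get((s2,s1))
--             if r2==0:
--                 ref[(s2,s1)] = 1
--     count = sum(ref.values())
--
--     return count==len(ref)
-- ===== SOURCE B (Python) =====
-- def validpair(seq1, seq2):
--     # Return-value equivalent to A; note A mutates list arguments in place
--     # (seq1 += (9,)), B does not.
--     squares = [(0, 1), (0, 4), (0, 9), (1, 6), (2, 5),
--                (3, 6), (4, 9), (6, 4), (8, 1)]
--
--     def digits(seq):
--         d = set(seq)
--         if 6 in d or 9 in d:
--             d.update((6, 9))
--         return d
--
--     d1 = digits(seq1)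
--     d2 = digits(seq2)
--     return all((a in d1 and b in d2) or (a in d2 and b in d1)
--                for a, b in squares)
-- ===== Notes on version B (the rewrite author's own statement) =====
-- stated objective: faster
-- what changed: Replaces A's double loop over all face pairs marking a mutable coverage dict (then summing its values) by building a 6/9-closed digit set per die once and checking membership of the nine required square pairs directly; B also does not mutate the list arguments as A does.
import Mathlib
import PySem

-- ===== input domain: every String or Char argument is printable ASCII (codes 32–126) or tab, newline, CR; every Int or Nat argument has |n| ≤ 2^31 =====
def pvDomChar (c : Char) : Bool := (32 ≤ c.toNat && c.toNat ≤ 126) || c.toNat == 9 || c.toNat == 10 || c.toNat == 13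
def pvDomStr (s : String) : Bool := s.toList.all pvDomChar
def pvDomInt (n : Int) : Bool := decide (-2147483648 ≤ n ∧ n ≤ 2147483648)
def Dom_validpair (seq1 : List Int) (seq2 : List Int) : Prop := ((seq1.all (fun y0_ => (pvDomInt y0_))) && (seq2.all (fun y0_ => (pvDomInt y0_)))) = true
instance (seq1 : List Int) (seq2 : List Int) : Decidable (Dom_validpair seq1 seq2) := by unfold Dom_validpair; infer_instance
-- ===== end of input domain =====

-- B replaces A's face-pair double loop over a mutable coverage dict by a digit-set
-- membership check over the nine required pairs (objective: simpler).
-- NOTE: Python A mutates list arguments in place (seq1 += (9,)); B does not.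
-- The equivalence proved here is about the RETURN value only.


-- ===== PORT A =====
def validpair (seq1 : List Int) (seq2 : List Int) : Bool :=
  let ref : PySem.Dict (Int × Int) Int :=
    PySem.Dict.ofList [((0,1),0), ((0,4),0), ((0,9),0), ((1,6),0), ((2,5),0),
                       ((3,6),0), ((4,9),0), ((6,4),0), ((8,1),0)]
  let seq1 := if (6:Int) ∈ seq1 then seq1 ++ [9] else seq1
  let seq1 := if (9:Int) ∈ seq1 then seq1 ++ [6] else seq1
  let seq2 := if (6:Int) ∈ seq2 then seq2 ++ [9] else seq2
  let seq2 := if (9:Int) ∈ seq2 then seq2 ++ [6] else seq2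
  let ref := seq1.foldl (fun ref s1 =>
    seq2.foldl (fun ref s2 =>
      let r1 := ref.get? (s1, s2)
      let ref := if r1 == some 0 then ref.insert (s1, s2) 1 else ref
      let r2 := ref.get? (s2, s1)
      if r2 == some 0 then ref.insert (s2, s1) 1 else ref) ref) ref
  let count := ref.values.sum
  count == (ref.size : Int)

-- ===== PORT B =====
def pvDigits (seq : List Int) : PySem.Set Int :=
  let d := PySem.Set.ofList seq
  if PySem.Set.contains d 6 || PySem.Set.contains d 9 then PySem.Set.update d [6, 9] else d

def validpair_alt (seq1 : List Int) (seq2 : List Int) : Bool :=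
  let squares : List (Int × Int) := [(0,1), (0,4), (0,9), (1,6), (2,5),
                                     (3,6), (4,9), (6,4), (8,1)]
  let d1 := pvDigits seq1
  let d2 := pvDigits seq2
  squares.all (fun ab =>
    (PySem.Set.contains d1 ab.1 && PySem.Set.contains d2 ab.2) ||
    (PySem.Set.contains d2 ab.1 && PySem.Set.contains d1 ab.2))

-- ===== PRECONDITION & SPEC =====
def Spec_validpair (seq1 : List Int) (seq2 : List Int) (out : Bool) : Prop := out = validpair_alt seq1 seq2
instance (seq1 : List Int) (seq2 : List Int) (out : Bool) : Decidable (Spec_validpair seq1 seq2 out) := by unfold Spec_validpair; infer_instance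

-- ===== CLAIM (what is proved, stated in full; the proofs are below) =====
def Claim_equal_validpair : Prop := ∀ (seq1 : List Int) (seq2 : List Int), Dom_validpair seq1 seq2 → Spec_validpair seq1 seq2 (validpair seq1 seq2)

-- ===== LEMMAS AND PROOFS =====

-- the nine keys of A's coverage dict
def pvK : List (Int × Int) := [(0,1), (0,4), (0,9), (1,6), (2,5), (3,6), (4,9), (6,4), (8,1)]

-- A's dict, abstracted: keys pvK, value 1 exactly where p holds
def pvMkD (p : Int × Int → Bool) : PySem.Dict (Int × Int) Int :=
  PySem.Dict.mk (pvK.map fun k => (k, if p k then (1:Int) else 0))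

lemma pvGet?_mkD (p : Int × Int → Bool) (k : Int × Int) :
    (pvMkD p).get? k = if k ∈ pvK then some (if p k then (1:Int) else 0) else none := by
  show (PySem.Dict.mk (pvK.map fun k => (k, if p k then (1:Int) else 0))).get? k = _
  induction pvK with
  | nil => simp [PySem.Dict.get?]
  | cons a t ih =>
    simp only [List.map_cons, PySem.Dict.get?_mk_cons, List.mem_cons]
    by_cases h : a = k
    · subst h; simp
    · have : (a == k) = false := by simp [h]
      simp [this, ih, Ne.symm h]

lemma pvMkD_congr (p q : Int × Int → Bool) (h : ∀ k ∈ pvK, p k = q k) : pvMkD p = pvMkD q := by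
  unfold pvMkD
  congr 1
  exact List.map_congr_left (fun k hk => by rw [h k hk])

-- one marking step of A's loop body
def pvMark (d : PySem.Dict (Int × Int) Int) (k : Int × Int) : PySem.Dict (Int × Int) Int :=
  if d.get? k == some 0 then d.insert k 1 else d

lemma pvMark_mkD (p : Int × Int → Bool) (k : Int × Int) :
    pvMark (pvMkD p) k = pvMkD (fun k' => p k' || k' == k) := by
  unfold pvMark
  by_cases hk : k ∈ pvK
  · by_cases hp : p k = true
    · have : (pvMkD p).get? k = some 1 := by rw [pvGet?_mkD]; simp [hk, hp]
      rw [this]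
      simp only [show ((some (1:Int) == some 0) = false) by decide]
      exact pvMkD_congr _ _ (fun k' _ => by
        by_cases h : k' = k
        · subst h; simp [hp]
        · have hbe : (k' == k) = false := by simp [h]
          simp [hbe])
    · have hget : (pvMkD p).get? k = some 0 := by
        rw [pvGet?_mkD]; simp [hk, hp]
      have hcont : (pvMkD p).contains k = true := by
        rw [PySem.Dict.contains_eq_isSome_get?, hget]; rfl
      rw [hget]
      simp only [show ((some (0:Int) == some 0) = true) by decide, if_true]
      apply PySem.Dict.ext
      rw [PySem.Dict.items_insert_of_contains _ _ hcont]
      show (pvK.map fun k' => (k', if p k' then (1:Int) else 0)).map _ =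
        pvK.map fun k' => (k', if (p k' || k' == k) then (1:Int) else 0)
      rw [List.map_map]
      refine List.map_congr_left (fun k' _ => ?_)
      by_cases h : k' = k
      · subst h; simp [hp]
      · have : (k' == k) = false := by simp [h]
        simp [this, h]
  · have : (pvMkD p).get? k = none := by rw [pvGet?_mkD]; simp [hk]
    rw [this]
    simp only [show ((none == some (0:Int)) = false) by decide]
    exact pvMkD_congr _ _ (fun k' hk' => by
      have : (k' == k) = false := by
        simp only [beq_eq_false_iff_ne, ne_eq]
        rintro rfl; exact hk hk'
      simp [this])

-- the inner loop over seq2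
lemma pvInner (s1 : Int) (l2 : List Int) (p : Int × Int → Bool) :
    l2.foldl (fun ref s2 =>
      let r1 := ref.get? (s1, s2)
      let ref := if r1 == some 0 then ref.insert (s1, s2) 1 else ref
      let r2 := ref.get? (s2, s1)
      if r2 == some 0 then ref.insert (s2, s1) 1 else ref) (pvMkD p)
    = pvMkD (fun k => p k || l2.any (fun s2 => k == (s1, s2) || k == (s2, s1))) := by
  induction l2 generalizing p with
  | nil => simp
  | cons a t ih =>
    simp only [List.foldl_cons]
    have step : (let r1 := (pvMkD p).get? (s1, a)
        let ref := if r1 == some 0 then (pvMkD p).insert (s1, a) 1 else pvMkD p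
        let r2 := ref.get? (a, s1)
        if r2 == some 0 then ref.insert (a, s1) 1 else ref)
        = pvMkD (fun k => (p k || k == (s1, a)) || k == (a, s1)) := by
      show pvMark (pvMark (pvMkD p) (s1, a)) (a, s1) = _
      rw [pvMark_mkD, pvMark_mkD]
    rw [step, ih]
    exact pvMkD_congr _ _ (fun k _ => by
      simp only [List.any_cons]
      cases p k <;> cases (k == (s1, a)) <;> cases (k == (a, s1)) <;>
        cases t.any (fun s2 => k == (s1, s2) || k == (s2, s1)) <;> rfl)

-- the whole double loop
lemma pvOuter (l1 l2 : List Int) (p : Int × Int → Bool) :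
    l1.foldl (fun ref s1 =>
      l2.foldl (fun ref s2 =>
        let r1 := ref.get? (s1, s2)
        let ref := if r1 == some 0 then ref.insert (s1, s2) 1 else ref
        let r2 := ref.get? (s2, s1)
        if r2 == some 0 then ref.insert (s2, s1) 1 else ref) ref) (pvMkD p)
    = pvMkD (fun k => p k ||
        l1.any (fun s1 => l2.any (fun s2 => k == (s1, s2) || k == (s2, s1)))) := by
  induction l1 generalizing p with
  | nil => simp
  | cons a t ih =>
    simp only [List.foldl_cons]
    rw [pvInner a l2 p, ih]
    exact pvMkD_congr _ _ (fun k _ => by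
      simp only [List.any_cons]
      cases p k <;> cases l2.any (fun s2 => k == (a, s2) || k == (s2, a)) <;>
        cases t.any (fun s1 => l2.any (fun s2 => k == (s1, s2) || k == (s2, s1))) <;> rfl)

-- A's extension of a sequence, as membership
def pvExt (l : List Int) : List Int :=
  let l := if (6:Int) ∈ l then l ++ [9] else l
  if (9:Int) ∈ l then l ++ [6] else l

lemma pvMem_ext (l : List Int) (x : Int) :
    x ∈ pvExt l ↔ PySem.Set.contains (pvDigits l) x = true := by
  unfold pvExt pvDigits
  simp only [PySem.Set.contains_eq_listContains, List.contains_eq_mem, PySem.Set.mem_ofList]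
  by_cases h6 : (6:Int) ∈ l <;> by_cases h9 : (9:Int) ∈ l <;>
    simp [h6, h9, List.mem_append] <;> aesop

-- coverage of one key, via memberships in the extended sequences
lemma pvAny_cov (e1 e2 : List Int) (k : Int × Int) :
    (e1.any (fun s1 => e2.any (fun s2 => k == (s1, s2) || k == (s2, s1))))
    = ((decide (k.1 ∈ e1) && decide (k.2 ∈ e2)) || (decide (k.2 ∈ e1) && decide (k.1 ∈ e2))) := by
  rcases k with ⟨a, b⟩
  rw [Bool.eq_iff_iff]
  simp only [List.any_eq_true, Bool.or_eq_true, Bool.and_eq_true, decide_eq_true_eq,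
    beq_iff_eq, Prod.mk.injEq]
  constructor
  · rintro ⟨s1, h1, s2, h2, ⟨rfl, rfl⟩ | ⟨rfl, rfl⟩⟩
    · exact Or.inl ⟨h1, h2⟩
    · exact Or.inr ⟨h1, h2⟩
  · rintro (⟨ha, hb⟩ | ⟨hb, ha⟩)
    · exact ⟨a, ha, b, hb, Or.inl ⟨rfl, rfl⟩⟩
    · exact ⟨b, hb, a, ha, Or.inr ⟨rfl, rfl⟩⟩

-- sum-of-0/1-values == 9  ↔  every key covered (on the concrete nine keys)
lemma pvSum_all (q : Int × Int → Bool) :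
    (((pvK.map fun k => (k, if q k then (1:Int) else 0)).map Prod.snd).sum == (9:Int))
    = pvK.all q := by
  show (((pvK.map fun k => (k, if q k then (1:Int) else 0)).map Prod.snd).sum == (9:Int)) = pvK.all q
  simp only [pvK, List.map_cons, List.map_nil, List.sum_cons, List.sum_nil, List.all_cons,
    List.all_nil]
  cases h1 : q (0,1) <;> cases h2 : q (0,4) <;> cases h3 : q (0,9) <;> cases h4 : q (1,6) <;>
    cases h5 : q (2,5) <;> cases h6 : q (3,6) <;> cases h7 : q (4,9) <;> cases h8 : q (6,4) <;>
    cases h9 : q (8,1) <;> simp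

lemma pvRef_eq : PySem.Dict.ofList
    [(((0:Int),(1:Int)),(0:Int)), ((0,4),0), ((0,9),0), ((1,6),0), ((2,5),0),
     ((3,6),0), ((4,9),0), ((6,4),0), ((8,1),0)] = pvMkD (fun _ => false) := by decide

-- bridge: decide-membership in A's extended list equals B's set membership
lemma pvDecide_mem (l : List Int) (x : Int) :
    decide (x ∈ pvExt l) = PySem.Set.contains (pvDigits l) x := by
  rw [Bool.eq_iff_iff]; simp [pvMem_ext]

-- ===== VERDICT (by name: the statement is the Claim_ definition above) =====
theorem validpair_spec : Claim_equal_validpair := by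
  intro seq1 seq2 _
  show validpair seq1 seq2 = validpair_alt seq1 seq2
  have h1 : validpair seq1 seq2 =
      (let ref := (pvExt seq1).foldl (fun ref s1 =>
        (pvExt seq2).foldl (fun ref s2 =>
          let r1 := ref.get? (s1, s2)
          let ref := if r1 == some 0 then ref.insert (s1, s2) 1 else ref
          let r2 := ref.get? (s2, s1)
          if r2 == some 0 then ref.insert (s2, s1) 1 else ref) ref) (pvMkD (fun _ => false))
      ref.values.sum == (ref.size : Int)) := by
    unfold validpair pvExt
    rw [pvRef_eq]
  rw [h1, pvOuter]
  set q : Int × Int → Bool := fun k =>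
    false || (pvExt seq1).any (fun s1 =>
      (pvExt seq2).any (fun s2 => k == (s1, s2) || k == (s2, s1))) with hq
  have hsize : ((pvMkD q).size : Int) = (9 : Int) := by
    simp [pvMkD, pvK, PySem.Dict.size]
  show ((pvMkD q).values.sum == ((pvMkD q).size : Int)) = validpair_alt seq1 seq2
  rw [hsize]
  have hval : (pvMkD q).values = (pvK.map fun k => (k, if q k then (1:Int) else 0)).map Prod.snd := rfl
  rw [hval, pvSum_all]
  have hq' : ∀ k : Int × Int, q k =
      ((PySem.Set.contains (pvDigits seq1) k.1 && PySem.Set.contains (pvDigits seq2) k.2) ||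
       (PySem.Set.contains (pvDigits seq2) k.1 && PySem.Set.contains (pvDigits seq1) k.2)) := by
    intro k
    rw [hq]
    simp only [Bool.false_or]
    rw [pvAny_cov, pvDecide_mem, pvDecide_mem, pvDecide_mem, pvDecide_mem]
    rw [Bool.and_comm (PySem.Set.contains (pvDigits seq1) k.2)]
  unfold validpair_alt
  show pvK.all q = pvK.all _
  congr 1
  funext k
  exact hq' k
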